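-- pv_equiv track=rewrite | github.com/magic-YuanTian/STEPS | SQL2NL_clean.py | simpleCompose
-- ===== SOURCE A (Python) =====
-- def simpleCompose(subs, dbid):
--     res = ''
--
--     categories = ['select', 'from', 'where', 'group', 'having', 'order']
--     # 6 categories
--     subexpression_dict = {
--         # 'select': '',
--         # 'from': '',
--         # 'where': '',
--         # 'group': '',
--         # 'having': '',
--         # 'order': '',
--     }
--
--     for sub in subs:
--         if sub.lower().startswith('select ') and 'select' not in subexpression_dict.keys():
--             subexpression_dict['select'] = sub
--         elif sub.lower().startswith('from ') and 'from' not in subexpression_dict.keys():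
--             subexpression_dict['from'] = sub
--         elif sub.lower().startswith('where ') and 'where' not in subexpression_dict.keys():
--             subexpression_dict['where'] = sub
--         elif sub.lower().startswith('group by ') and 'group' not in subexpression_dict.keys():
--             subexpression_dict['group'] = sub
--         elif sub.lower().startswith('having ') and 'having' not in subexpression_dict.keys():
--             subexpression_dict['having'] = sub
--         elif sub.lower().startswith('order by ') and 'order' not in subexpression_dict.keys():
--             subexpression_dict['order'] = sub
--
--     # handle missing select
--     if 'select' not in subexpression_dict.keys():
--         subexpression_dict['select'] = 'SELECT *'
--
--     for key in categories:
--         if key in subexpression_dict.keys():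
--             res += ' ' + subexpression_dict[key]
--
--     res = res.strip()
--
--     return res
-- ===== SOURCE B (Python) =====
-- def simpleCompose(subs, dbid):
--     # Per-clause scan: for each clause prefix in order, take the first matching
--     # subexpression; 'SELECT *' stands in when no select clause exists.
--     def first(prefix):
--         return next((s for s in subs if s.lower().startswith(prefix)), None)
--
--     sel = first('select ')
--     parts = ['SELECT *' if sel is None else sel]
--     for prefix in ('from ', 'where ', 'group by ', 'having ', 'order by '):
--         m = first(prefix)
--         if m is not None:
--             parts.append(m)
--     return ' '.join(parts).strip()
-- ===== Notes on version B (the rewrite author's own statement) =====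
-- stated objective: simpler
-- what changed: A makes one pass over subs populating a dict keyed by clause name and then walks the category list reading the dict back; B drops the dict entirely and, for each clause prefix in the fixed order, scans subs for the first matching subexpression, joining the hits (with 'SELECT *' standing in for a missing select clause).
import Mathlib
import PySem

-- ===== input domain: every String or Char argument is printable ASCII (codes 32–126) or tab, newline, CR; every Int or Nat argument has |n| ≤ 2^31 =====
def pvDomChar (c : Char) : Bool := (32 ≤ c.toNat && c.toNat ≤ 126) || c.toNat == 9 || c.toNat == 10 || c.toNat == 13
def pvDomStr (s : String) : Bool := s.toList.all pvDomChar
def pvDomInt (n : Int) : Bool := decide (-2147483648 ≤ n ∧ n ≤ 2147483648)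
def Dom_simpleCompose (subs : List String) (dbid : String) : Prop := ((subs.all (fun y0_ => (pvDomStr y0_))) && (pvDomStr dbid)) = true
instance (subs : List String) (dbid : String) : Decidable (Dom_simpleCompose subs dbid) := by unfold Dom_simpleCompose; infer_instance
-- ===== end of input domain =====

-- B replaces A's single-pass dict population with a direct per-clause first-match scan
-- over the fixed clause order (no intermediate dict); objective: simpler.

-- ===== PORT A =====
-- one iteration of A's first loop (the elif chain populating the dict)
def simpleComposeStep (d : PySem.Dict String String) (sub : String) : PySem.Dict String String :=
  if PySem.Str.startswith (PySem.Str.lower sub) "select " && !(d.contains "select") then d.insert "select" sub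
  else if PySem.Str.startswith (PySem.Str.lower sub) "from " && !(d.contains "from") then d.insert "from" sub
  else if PySem.Str.startswith (PySem.Str.lower sub) "where " && !(d.contains "where") then d.insert "where" sub
  else if PySem.Str.startswith (PySem.Str.lower sub) "group by " && !(d.contains "group") then d.insert "group" sub
  else if PySem.Str.startswith (PySem.Str.lower sub) "having " && !(d.contains "having") then d.insert "having" sub
  else if PySem.Str.startswith (PySem.Str.lower sub) "order by " && !(d.contains "order") then d.insert "order" sub
  else d

def simpleCompose (subs : List String) (dbid : String) : String :=
  let categories : List String := ["select", "from", "where", "group", "having", "order"]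
  let d0 := subs.foldl simpleComposeStep PySem.Dict.empty
  let d := if !(d0.contains "select") then d0.insert "select" "SELECT *" else d0
  let res := categories.foldl (fun res key =>
    match d.get? key with
    | some v => res ++ " " ++ v
    | none => res) ""
  PySem.Str.strip res

-- ===== PORT B =====
def simpleCompose_alt (subs : List String) (dbid : String) : String :=
  let first := fun (p : String) => subs.find? (fun s => PySem.Str.startswith (PySem.Str.lower s) p)
  let parts : List String :=
    (match first "select " with | none => "SELECT *" | some s => s) ::
      (["from ", "where ", "group by ", "having ", "order by "].foldl
        (fun acc p => match first p with | some m => acc ++ [m] | none => acc) [])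
  PySem.Str.strip (PySem.Str.join " " parts)

-- ===== PRECONDITION & SPEC =====
def Spec_simpleCompose (subs : List String) (dbid : String) (out : String) : Prop := out = simpleCompose_alt subs dbid
instance (subs : List String) (dbid : String) (out : String) : Decidable (Spec_simpleCompose subs dbid out) := by unfold Spec_simpleCompose; infer_instance

-- ===== CLAIM (what is proved, stated in full; the proofs are below) =====
def Claim_equal_simpleCompose : Prop := ∀ (subs : List String) (dbid : String), Dom_simpleCompose subs dbid → Spec_simpleCompose subs dbid (simpleCompose subs dbid)

-- ===== LEMMAS AND PROOFS =====

def mP (p s : String) : Bool := PySem.Str.startswith (PySem.Str.lower s) p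
lemma startswith_head {l p : List Char} (hne : p ≠ []) (h : PySem.Chars.startswith l p = true) :
    l.head? = p.head? := by
  rw [PySem.Chars.startswith_iff] at h
  obtain ⟨t, rfl⟩ := h
  cases p with
  | nil => exact absurd rfl hne
  | cons a q => simp
lemma mP_excl {p q s : String} (hp : mP p s = true) (hP : p.toList ≠ []) (hQ : q.toList ≠ [])
    (hne : p.toList.head? ≠ q.toList.head?) : mP q s = false := by
  by_contra h
  rw [Bool.not_eq_false] at h
  unfold mP at hp h
  rw [PySem.Str.startswith_eq] at hp h
  exact hne ((startswith_head hP hp).symm.trans (startswith_head hQ h))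
lemma hit_key (d : PySem.Dict String String) (k s : String) (o : Option String) :
    ((if d.contains k then d else d.insert k s).get? k).or o = (d.get? k).or (some s) := by
  cases hg : d.get? k with
  | some v =>
      have hc : d.contains k = true := by rw [PySem.Dict.contains_eq_isSome_get?, hg]; rfl
      simp [hc, hg]
  | none =>
      have hc : d.contains k = false := by rw [PySem.Dict.contains_eq_isSome_get?, hg]; rfl
      simp [hc, PySem.Dict.get?_insert_self]
lemma miss_key (d : PySem.Dict String String) (k k' s : String) (h : k' ≠ k) :
    (if d.contains k then d else d.insert k s).get? k' = d.get? k' := by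
  split
  · rfl
  · exact PySem.Dict.get?_insert_of_ne d s h
lemma step_eq (d : PySem.Dict String String) (s : String) : simpleComposeStep d s =
    if mP "select " s then (if d.contains "select" then d else d.insert "select" s)
    else if mP "from " s then (if d.contains "from" then d else d.insert "from" s)
    else if mP "where " s then (if d.contains "where" then d else d.insert "where" s)
    else if mP "group by " s then (if d.contains "group" then d else d.insert "group" s)
    else if mP "having " s then (if d.contains "having" then d else d.insert "having" s)
    else if mP "order by " s then (if d.contains "order" then d else d.insert "order" s)
    else d := by
  unfold simpleComposeStep
  by_cases h1 : mP "select " s = true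
  · have e2 := mP_excl (q := "from ") h1 (by decide) (by decide) (by decide)
    have e3 := mP_excl (q := "where ") h1 (by decide) (by decide) (by decide)
    have e4 := mP_excl (q := "group by ") h1 (by decide) (by decide) (by decide)
    have e5 := mP_excl (q := "having ") h1 (by decide) (by decide) (by decide)
    have e6 := mP_excl (q := "order by ") h1 (by decide) (by decide) (by decide)
    simp [mP] at h1 e2 e3 e4 e5 e6
    cases hc : d.contains "select" <;> simp [mP, h1, e2, e3, e4, e5, e6, hc]
  · by_cases h2 : mP "from " s = true
    · have e3 := mP_excl (q := "where ") h2 (by decide) (by decide) (by decide)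
      have e4 := mP_excl (q := "group by ") h2 (by decide) (by decide) (by decide)
      have e5 := mP_excl (q := "having ") h2 (by decide) (by decide) (by decide)
      have e6 := mP_excl (q := "order by ") h2 (by decide) (by decide) (by decide)
      simp [mP] at h1 h2 e3 e4 e5 e6
      cases hc : d.contains "from" <;> simp [mP, h1, h2, e3, e4, e5, e6, hc]
    · by_cases h3 : mP "where " s = true
      · have e4 := mP_excl (q := "group by ") h3 (by decide) (by decide) (by decide)
        have e5 := mP_excl (q := "having ") h3 (by decide) (by decide) (by decide)
        have e6 := mP_excl (q := "order by ") h3 (by decide) (by decide) (by decide)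
        simp [mP] at h1 h2 h3 e4 e5 e6
        cases hc : d.contains "where" <;> simp [mP, h1, h2, h3, e4, e5, e6, hc]
      · by_cases h4 : mP "group by " s = true
        · have e5 := mP_excl (q := "having ") h4 (by decide) (by decide) (by decide)
          have e6 := mP_excl (q := "order by ") h4 (by decide) (by decide) (by decide)
          simp [mP] at h1 h2 h3 h4 e5 e6
          cases hc : d.contains "group" <;> simp [mP, h1, h2, h3, h4, e5, e6, hc]
        · by_cases h5 : mP "having " s = true
          · have e6 := mP_excl (q := "order by ") h5 (by decide) (by decide) (by decide)
            simp [mP] at h1 h2 h3 h4 h5 e6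
            cases hc : d.contains "having" <;> simp [mP, h1, h2, h3, h4, h5, e6, hc]
          · by_cases h6 : mP "order by " s = true
            · simp [mP] at h1 h2 h3 h4 h5 h6
              cases hc : d.contains "order" <;> simp [mP, h1, h2, h3, h4, h5, h6, hc]
            · simp [mP] at h1 h2 h3 h4 h5 h6
              simp [mP, h1, h2, h3, h4, h5, h6]
lemma fold_char (subs : List String) : ∀ d : PySem.Dict String String,
    ((subs.foldl simpleComposeStep d).get? "select" = (d.get? "select").or (subs.find? (mP "select ")))
    ∧ ((subs.foldl simpleComposeStep d).get? "from" = (d.get? "from").or (subs.find? (mP "from ")))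
    ∧ ((subs.foldl simpleComposeStep d).get? "where" = (d.get? "where").or (subs.find? (mP "where ")))
    ∧ ((subs.foldl simpleComposeStep d).get? "group" = (d.get? "group").or (subs.find? (mP "group by ")))
    ∧ ((subs.foldl simpleComposeStep d).get? "having" = (d.get? "having").or (subs.find? (mP "having ")))
    ∧ ((subs.foldl simpleComposeStep d).get? "order" = (d.get? "order").or (subs.find? (mP "order by "))) := by
  induction subs with
  | nil => intro d; simp
  | cons s t ih =>
    intro d
    rw [List.foldl_cons, step_eq]
    by_cases h1 : mP "select " s = true
    · have e2 := mP_excl (q := "from ") h1 (by decide) (by decide) (by decide)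
      have e3 := mP_excl (q := "where ") h1 (by decide) (by decide) (by decide)
      have e4 := mP_excl (q := "group by ") h1 (by decide) (by decide) (by decide)
      have e5 := mP_excl (q := "having ") h1 (by decide) (by decide) (by decide)
      have e6 := mP_excl (q := "order by ") h1 (by decide) (by decide) (by decide)
      rw [if_pos h1]
      obtain ⟨i1, i2, i3, i4, i5, i6⟩ := ih (if d.contains "select" then d else d.insert "select" s)
      refine ⟨?_, ?_, ?_, ?_, ?_, ?_⟩
      · rw [i1, List.find?_cons_of_pos h1]; exact hit_key d "select" s _
      · rw [i2, List.find?_cons_of_neg (by simp [e2]), miss_key d "select" "from" s (by decide)]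
      · rw [i3, List.find?_cons_of_neg (by simp [e3]), miss_key d "select" "where" s (by decide)]
      · rw [i4, List.find?_cons_of_neg (by simp [e4]), miss_key d "select" "group" s (by decide)]
      · rw [i5, List.find?_cons_of_neg (by simp [e5]), miss_key d "select" "having" s (by decide)]
      · rw [i6, List.find?_cons_of_neg (by simp [e6]), miss_key d "select" "order" s (by decide)]
    · by_cases h2 : mP "from " s = true
      · have e3 := mP_excl (q := "where ") h2 (by decide) (by decide) (by decide)
        have e4 := mP_excl (q := "group by ") h2 (by decide) (by decide) (by decide)
        have e5 := mP_excl (q := "having ") h2 (by decide) (by decide) (by decide)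
        have e6 := mP_excl (q := "order by ") h2 (by decide) (by decide) (by decide)
        rw [if_neg h1, if_pos h2]
        obtain ⟨i1, i2, i3, i4, i5, i6⟩ := ih (if d.contains "from" then d else d.insert "from" s)
        refine ⟨?_, ?_, ?_, ?_, ?_, ?_⟩
        · rw [i1, List.find?_cons_of_neg h1, miss_key d "from" "select" s (by decide)]
        · rw [i2, List.find?_cons_of_pos h2]; exact hit_key d "from" s _
        · rw [i3, List.find?_cons_of_neg (by simp [e3]), miss_key d "from" "where" s (by decide)]
        · rw [i4, List.find?_cons_of_neg (by simp [e4]), miss_key d "from" "group" s (by decide)]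
        · rw [i5, List.find?_cons_of_neg (by simp [e5]), miss_key d "from" "having" s (by decide)]
        · rw [i6, List.find?_cons_of_neg (by simp [e6]), miss_key d "from" "order" s (by decide)]
      · by_cases h3 : mP "where " s = true
        · have e4 := mP_excl (q := "group by ") h3 (by decide) (by decide) (by decide)
          have e5 := mP_excl (q := "having ") h3 (by decide) (by decide) (by decide)
          have e6 := mP_excl (q := "order by ") h3 (by decide) (by decide) (by decide)
          rw [if_neg h1, if_neg h2, if_pos h3]
          obtain ⟨i1, i2, i3, i4, i5, i6⟩ := ih (if d.contains "where" then d else d.insert "where" s)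
          refine ⟨?_, ?_, ?_, ?_, ?_, ?_⟩
          · rw [i1, List.find?_cons_of_neg h1, miss_key d "where" "select" s (by decide)]
          · rw [i2, List.find?_cons_of_neg h2, miss_key d "where" "from" s (by decide)]
          · rw [i3, List.find?_cons_of_pos h3]; exact hit_key d "where" s _
          · rw [i4, List.find?_cons_of_neg (by simp [e4]), miss_key d "where" "group" s (by decide)]
          · rw [i5, List.find?_cons_of_neg (by simp [e5]), miss_key d "where" "having" s (by decide)]
          · rw [i6, List.find?_cons_of_neg (by simp [e6]), miss_key d "where" "order" s (by decide)]
        · by_cases h4 : mP "group by " s = true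
          · have e5 := mP_excl (q := "having ") h4 (by decide) (by decide) (by decide)
            have e6 := mP_excl (q := "order by ") h4 (by decide) (by decide) (by decide)
            rw [if_neg h1, if_neg h2, if_neg h3, if_pos h4]
            obtain ⟨i1, i2, i3, i4, i5, i6⟩ := ih (if d.contains "group" then d else d.insert "group" s)
            refine ⟨?_, ?_, ?_, ?_, ?_, ?_⟩
            · rw [i1, List.find?_cons_of_neg h1, miss_key d "group" "select" s (by decide)]
            · rw [i2, List.find?_cons_of_neg h2, miss_key d "group" "from" s (by decide)]
            · rw [i3, List.find?_cons_of_neg h3, miss_key d "group" "where" s (by decide)]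
            · rw [i4, List.find?_cons_of_pos h4]; exact hit_key d "group" s _
            · rw [i5, List.find?_cons_of_neg (by simp [e5]), miss_key d "group" "having" s (by decide)]
            · rw [i6, List.find?_cons_of_neg (by simp [e6]), miss_key d "group" "order" s (by decide)]
          · by_cases h5 : mP "having " s = true
            · have e6 := mP_excl (q := "order by ") h5 (by decide) (by decide) (by decide)
              rw [if_neg h1, if_neg h2, if_neg h3, if_neg h4, if_pos h5]
              obtain ⟨i1, i2, i3, i4, i5, i6⟩ := ih (if d.contains "having" then d else d.insert "having" s)
              refine ⟨?_, ?_, ?_, ?_, ?_, ?_⟩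
              · rw [i1, List.find?_cons_of_neg h1, miss_key d "having" "select" s (by decide)]
              · rw [i2, List.find?_cons_of_neg h2, miss_key d "having" "from" s (by decide)]
              · rw [i3, List.find?_cons_of_neg h3, miss_key d "having" "where" s (by decide)]
              · rw [i4, List.find?_cons_of_neg h4, miss_key d "having" "group" s (by decide)]
              · rw [i5, List.find?_cons_of_pos h5]; exact hit_key d "having" s _
              · rw [i6, List.find?_cons_of_neg (by simp [e6]), miss_key d "having" "order" s (by decide)]
            · by_cases h6 : mP "order by " s = true
              · rw [if_neg h1, if_neg h2, if_neg h3, if_neg h4, if_neg h5, if_pos h6]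
                obtain ⟨i1, i2, i3, i4, i5, i6⟩ := ih (if d.contains "order" then d else d.insert "order" s)
                refine ⟨?_, ?_, ?_, ?_, ?_, ?_⟩
                · rw [i1, List.find?_cons_of_neg h1, miss_key d "order" "select" s (by decide)]
                · rw [i2, List.find?_cons_of_neg h2, miss_key d "order" "from" s (by decide)]
                · rw [i3, List.find?_cons_of_neg h3, miss_key d "order" "where" s (by decide)]
                · rw [i4, List.find?_cons_of_neg h4, miss_key d "order" "group" s (by decide)]
                · rw [i5, List.find?_cons_of_neg h5, miss_key d "order" "having" s (by decide)]
                · rw [i6, List.find?_cons_of_pos h6]; exact hit_key d "order" s _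
              · rw [if_neg h1, if_neg h2, if_neg h3, if_neg h4, if_neg h5, if_neg h6]
                obtain ⟨i1, i2, i3, i4, i5, i6⟩ := ih d
                refine ⟨?_, ?_, ?_, ?_, ?_, ?_⟩
                · rw [i1, List.find?_cons_of_neg h1]
                · rw [i2, List.find?_cons_of_neg h2]
                · rw [i3, List.find?_cons_of_neg h3]
                · rw [i4, List.find?_cons_of_neg h4]
                · rw [i5, List.find?_cons_of_neg h5]
                · rw [i6, List.find?_cons_of_neg h6]

lemma dropWhile_space (l : List Char) : PySem.Chars.strip (' ' :: l) = PySem.Chars.strip l := by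
  simp [PySem.Chars.strip, PySem.Chars.lstrip, PySem.Chars.isspace]

lemma strip_eq_strip {x y : String} (h : x.toList = ' ' :: y.toList) : PySem.Str.strip x = PySem.Str.strip y := by
  simp [PySem.Str.strip, h, dropWhile_space]

lemma mP_eq (p : String) : (fun s => PySem.Str.startswith (PySem.Str.lower s) p) = mP p := rfl


lemma simpleCompose_eq_alt (subs : List String) (dbid : String) : simpleCompose subs dbid = simpleCompose_alt subs dbid := by
  unfold simpleCompose simpleCompose_alt
  simp only [mP_eq]
  obtain ⟨i1, i2, i3, i4, i5, i6⟩ := fold_char subs PySem.Dict.empty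
  simp only [PySem.Dict.get?_empty, Option.none_or] at i1 i2 i3 i4 i5 i6
  cases hs : subs.find? (mP "select ") with
  | some vs =>
    have hc : (subs.foldl simpleComposeStep PySem.Dict.empty).contains "select" = true := by
      rw [PySem.Dict.contains_eq_isSome_get?, i1, hs]; rfl
    cases hf : subs.find? (mP "from ") <;> cases hw : subs.find? (mP "where ") <;>
      cases hg : subs.find? (mP "group by ") <;> cases hh : subs.find? (mP "having ") <;>
        cases ho : subs.find? (mP "order by ") <;>
      · apply strip_eq_strip
        simp [hc, i1, i2, i3, i4, i5, i6, hs, hf, hw, hg, hh, ho,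
              PySem.Chars.join_cons_cons, PySem.Chars.join_singleton]
  | none =>
    have hc : (subs.foldl simpleComposeStep PySem.Dict.empty).contains "select" = false := by
      rw [PySem.Dict.contains_eq_isSome_get?, i1, hs]; rfl
    have g1 : ((subs.foldl simpleComposeStep PySem.Dict.empty).insert "select" "SELECT *").get? "select" = some "SELECT *" :=
      PySem.Dict.get?_insert_self _ _ _
    have g2 := PySem.Dict.get?_insert_of_ne (k := "select") (k' := "from") (subs.foldl simpleComposeStep PySem.Dict.empty) "SELECT *" (by decide)
    have g3 := PySem.Dict.get?_insert_of_ne (k := "select") (k' := "where") (subs.foldl simpleComposeStep PySem.Dict.empty) "SELECT *" (by decide)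
    have g4 := PySem.Dict.get?_insert_of_ne (k := "select") (k' := "group") (subs.foldl simpleComposeStep PySem.Dict.empty) "SELECT *" (by decide)
    have g5 := PySem.Dict.get?_insert_of_ne (k := "select") (k' := "having") (subs.foldl simpleComposeStep PySem.Dict.empty) "SELECT *" (by decide)
    have g6 := PySem.Dict.get?_insert_of_ne (k := "select") (k' := "order") (subs.foldl simpleComposeStep PySem.Dict.empty) "SELECT *" (by decide)
    have hS : " SELECT *".toList = [' ', 'S', 'E', 'L', 'E', 'C', 'T', ' ', '*'] := by decide
    cases hf : subs.find? (mP "from ") <;> cases hw : subs.find? (mP "where ") <;>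
      cases hg : subs.find? (mP "group by ") <;> cases hh : subs.find? (mP "having ") <;>
        cases ho : subs.find? (mP "order by ") <;>
      · apply strip_eq_strip
        simp [hc, g1, g2, g3, g4, g5, g6, i2, i3, i4, i5, i6, hf, hw, hg, hh, ho, hS,
              PySem.Chars.join_cons_cons, PySem.Chars.join_singleton]

-- ===== VERDICT (by name: the statement is the Claim_ definition above) =====
theorem simpleCompose_spec : Claim_equal_simpleCompose := by
  intro subs dbid _
  unfold Spec_simpleCompose
  exact simpleCompose_eq_alt subs dbid
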